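-- pv_equiv track=rewrite | github.com/humlab/text_analytic_tools | Scripts/NER_runner.py | extract_entity_phrases
-- ===== SOURCE A (Python) =====
-- def extract_entity_phrases(data, classes = [ 'LOCATION', 'PERSON']):
--
--     # Extract entities of selected classes, add index to enable merge to phrases
--     entities = [ (i, word, wclass)
--         for (i, (word, wclass)) in enumerate(data)
--             if wclass in classes ]
--
--     # Merge adjacent entities having the same classifier
--     for i in range(len(entities) - 1, 0, -1):
--         if entities[i][0] == entities[i-1][0] + 1 and entities[i][2] == entities[i-1][2]:
--             entities[i-1] = (entities[i-1][0], entities[i-1][1] + " " + entities[i][1], entities[i-1][2])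
--             del entities[i]
--
--     # Remove index in returned data
--     return [ (word, wclass) for (i, word, wclass) in entities  ]
-- ===== SOURCE B (Python) =====
-- def extract_entity_phrases(data, classes = [ 'LOCATION', 'PERSON']):
--     # Single forward pass: collect each run of adjacent same-class entities in a
--     # word list, flush it as one joined phrase when the run breaks. O(n), no deletions.
--     class_set = set(classes)
--     result = []
--     run = []
--     run_class = None
--     prev = -2
--     for i, (word, wclass) in enumerate(data):
--         if wclass in class_set:
--             if i == prev + 1 and wclass == run_class:
--                 run.append(word)
--             else:
--                 if run:
--                     result.append((" ".join(run), run_class))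
--                 run = [word]
--                 run_class = wclass
--             prev = i
--     if run:
--         result.append((" ".join(run), run_class))
--     return result
-- ===== Notes on version B (the rewrite author's own statement) =====
-- stated objective: faster
-- what changed: Replaces the backward pass with in-place list deletions (each del is O(n)) and a per-item linear class-list scan by a single forward pass over a set of classes that accumulates each run's words and flushes one joined phrase per run.
import Mathlib
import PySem

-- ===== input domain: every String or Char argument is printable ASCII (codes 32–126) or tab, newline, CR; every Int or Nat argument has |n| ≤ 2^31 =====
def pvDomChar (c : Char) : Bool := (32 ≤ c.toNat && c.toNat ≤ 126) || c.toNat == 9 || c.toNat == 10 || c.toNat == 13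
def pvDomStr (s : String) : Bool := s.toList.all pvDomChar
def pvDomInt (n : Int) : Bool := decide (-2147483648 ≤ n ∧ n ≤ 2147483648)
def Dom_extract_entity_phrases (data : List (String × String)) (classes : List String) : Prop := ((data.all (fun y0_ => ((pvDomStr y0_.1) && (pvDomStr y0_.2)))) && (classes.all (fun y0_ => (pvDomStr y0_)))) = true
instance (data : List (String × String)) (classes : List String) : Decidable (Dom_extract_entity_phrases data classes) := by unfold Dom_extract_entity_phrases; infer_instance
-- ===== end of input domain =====

-- B replaces A's backward pass with in-place deletions (each `del` costs O(n)) and its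
-- per-item class-list scan by a single forward pass over a set of classes that collects
-- each run's words and flushes one joined phrase per run (measured faster by the check).

-- ===== PORT A =====
-- entities = [ (i, word, wclass) for (i, (word, wclass)) in enumerate(data) if wclass in classes ]
def pvEntA (data : List (String × String)) (classes : List String) : List (Int × String × String) :=
  ((PySem.List.enumerate data).filter (fun p => classes.contains p.2.2)).map
    (fun p => (p.1, p.2.1, p.2.2))

-- one iteration of A's backward loop at index i; the loop only visits i with
-- 1 ≤ i < len(entities), so both indexed accesses are in range and getD is exact there
def pvStepA (es : List (Int × String × String)) (i : Nat) : List (Int × String × String) :=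
  let b := es.getD i (0, "", "")
  let a := es.getD (i - 1) (0, "", "")
  if b.1 = a.1 + 1 ∧ b.2.2 = a.2.2 then
    (es.set (i - 1) (a.1, a.2.1 ++ " " ++ b.2.1, a.2.2)).eraseIdx i
  else es

-- for i in range(len(entities) - 1, 0, -1): … , as downward recursion on i
def pvLoopA : List (Int × String × String) → Nat → List (Int × String × String)
  | es, 0 => es
  | es, i + 1 => pvLoopA (pvStepA es (i + 1)) i

def extract_entity_phrases (data : List (String × String)) (classes : List String) :
    List (String × String) :=
  (pvLoopA (pvEntA data classes) ((pvEntA data classes).length - 1)).map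
    (fun e => (e.2.1, e.2.2))

-- ===== PORT B =====
-- loop body; state = (result, cur = Some (run, run_class) | None, prev).
-- In Source B `run` is empty iff run_class is None; while run is empty prev = -2 and
-- i ≥ 0, so the merge test `i == prev + 1 and wclass == run_class` cannot fire:
-- the `none` branch is exact.
def pvStepB (classSet : List String)
    (st : List (String × String) × Option (List String × String) × Int)
    (p : Int × (String × String)) :
    List (String × String) × Option (List String × String) × Int :=
  let (res, cur, prev) := st
  let (i, word, wclass) := p
  if PySem.Set.contains classSet wclass then
    match cur with
    | some (run, rc) =>
      if i = prev + 1 ∧ wclass = rc then (res, some (run ++ [word], rc), i)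
      else (res ++ [(PySem.Str.join " " run, rc)], some ([word], wclass), i)
    | none => (res, some ([word], wclass), i)
  else st

-- final flush: `if run: result.append((" ".join(run), run_class))`
def pvFlushB (st : List (String × String) × Option (List String × String) × Int) :
    List (String × String) :=
  match st.2.1 with
  | some rc => st.1 ++ [(PySem.Str.join " " rc.1, rc.2)]
  | none => st.1

def extract_entity_phrases_alt (data : List (String × String)) (classes : List String) :
    List (String × String) :=
  pvFlushB ((PySem.List.enumerate data).foldl (pvStepB (PySem.Set.ofList classes))
    ([], none, -2))

-- ===== PRECONDITION & SPEC =====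
def Spec_extract_entity_phrases (data : List (String × String)) (classes : List String) (out : List (String × String)) : Prop := out = extract_entity_phrases_alt data classes
instance (data : List (String × String)) (classes : List String) (out : List (String × String)) : Decidable (Spec_extract_entity_phrases data classes out) := by unfold Spec_extract_entity_phrases; infer_instance

-- ===== CLAIM (what is proved, stated in full; the proofs are below) =====
def Claim_equal_extract_entity_phrases : Prop := ∀ (data : List (String × String)) (classes : List String), Dom_extract_entity_phrases data classes → Spec_extract_entity_phrases data classes (extract_entity_phrases data classes)

-- ===== LEMMAS AND PROOFS =====

-- common reference point: right-to-left merge of adjacent same-class entities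
def pvProj (e : Int × String × String) : String × String := (e.2.1, e.2.2)

def pvMStep (a : Int × String × String) (m : List (Int × String × String)) :
    List (Int × String × String) :=
  match m with
  | [] => [a]
  | b :: t =>
    if b.1 = a.1 + 1 ∧ b.2.2 = a.2.2 then (a.1, a.2.1 ++ " " ++ b.2.1, a.2.2) :: t
    else a :: b :: t

def pvMerge (es : List (Int × String × String)) : List (Int × String × String) :=
  es.foldr pvMStep []

theorem pvMStep_ne_nil (a : Int × String × String) (m : List (Int × String × String)) :
    pvMStep a m ≠ [] := by
  cases m
  · simp [pvMStep]
  · simp only [pvMStep]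
    split <;> simp

theorem pvFoldr_acc_ne_nil (es m : List (Int × String × String)) (hm : m ≠ []) :
    es.foldr pvMStep m ≠ [] := by
  induction es with
  | nil => simpa
  | cons a es ih => simpa using pvMStep_ne_nil a (es.foldr pvMStep m)

theorem pvFoldr_append_last (es m : List (Int × String × String))
    (b : Int × String × String) (hm : m ≠ []) :
    es.foldr pvMStep (m ++ [b]) = es.foldr pvMStep m ++ [b] := by
  induction es with
  | nil => simp
  | cons a es ih =>
    simp only [List.foldr_cons, ih]
    obtain ⟨c, t, hct⟩ := List.exists_cons_of_ne_nil (pvFoldr_acc_ne_nil es m hm)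
    rw [hct]
    simp only [pvMStep, List.cons_append]
    split <;> simp

theorem pvMerge_cons_head (a : Int × String × String) (t : List (Int × String × String)) :
    ∃ w r, pvMerge (a :: t) = (a.1, w, a.2.2) :: r := by
  show ∃ w r, pvMStep a (pvMerge t) = _
  cases h : pvMerge t with
  | nil => exact ⟨a.2.1, [], by simp [pvMStep]⟩
  | cons b t' =>
    by_cases hc : b.1 = a.1 + 1 ∧ b.2.2 = a.2.2
    · exact ⟨a.2.1 ++ " " ++ b.2.1, t', by simp [pvMStep, hc]⟩
    · exact ⟨a.2.1, b :: t', by simp [pvMStep, hc]⟩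

-- the head word of pvMStep is the given word plus a suffix independent of that word
theorem pvMStep_word (i : Int) (c w1 w2 : String) (m : List (Int × String × String)) :
    ∃ s r, pvMStep (i, w1, c) m = (i, w1 ++ s, c) :: r ∧
           pvMStep (i, w2, c) m = (i, w2 ++ s, c) :: r := by
  unfold pvMStep
  cases m with
  | nil => exact ⟨"", [], by simp [String.append_empty], by simp [String.append_empty]⟩
  | cons b t =>
    by_cases h : b.1 = i + 1 ∧ b.2.2 = c
    · exact ⟨" " ++ b.2.1, t, by simp [h, String.append_assoc], by simp [h, String.append_assoc]⟩
    · exact ⟨"", b :: t, by simp [h, String.append_empty], by simp [h, String.append_empty]⟩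

-- ===== A-side: the backward deletion loop computes pvMerge =====
theorem pvLoopA_inv (i : Nat) :
    ∀ es : List (Int × String × String), i < es.length →
      pvLoopA es i = pvMerge (es.take (i + 1)) ++ es.drop (i + 1) := by
  induction i with
  | zero =>
    intro es h
    obtain ⟨a, t, rfl⟩ := List.exists_cons_of_ne_nil (List.ne_nil_of_length_pos h)
    simp [pvLoopA, pvMerge, pvMStep]
  | succ i ih =>
    intro es h
    have hi : i < es.length := by omega
    have hgb : es.getD (i + 1) (0, "", "") = es[i + 1] := List.getD_eq_getElem es _ h
    have hga : es.getD i (0, "", "") = es[i] := List.getD_eq_getElem es _ hi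
    have htake2 : es.take (i + 2) = es.take i ++ [es[i], es[i + 1]] := by
      rw [show i + 2 = i + 1 + 1 from rfl]
      rw [List.take_succ_eq_append_getElem h]
      rw [List.take_succ_eq_append_getElem hi, List.append_assoc]
      rfl
    show pvLoopA (pvStepA es (i + 1)) i = _
    unfold pvStepA
    simp only [Nat.add_sub_cancel, hgb, hga]
    by_cases hc : (es[i + 1]).1 = (es[i]).1 + 1 ∧ (es[i + 1]).2.2 = (es[i]).2.2
    · rw [if_pos hc]
      set v : Int × String × String :=
        ((es[i]).1, (es[i]).2.1 ++ " " ++ (es[i + 1]).2.1, (es[i]).2.2) with hv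
      have hset : es.set i v = es.take i ++ v :: es.drop (i + 1) :=
        List.set_eq_take_cons_drop v hi
      have hes' : (es.set i v).eraseIdx (i + 1) = (es.take i ++ [v]) ++ es.drop (i + 2) := by
        rw [List.eraseIdx_eq_take_drop_succ, hset]
        have hlen : (es.take i).length = i := List.length_take_of_le (by omega)
        rw [List.take_append, List.drop_append, hlen]
        rw [show i + 1 - i = 1 from by omega, show i + 1 + 1 - i = 2 from by omega]
        rw [List.take_of_length_le (by rw [hlen]; omega)]
        rw [List.drop_eq_nil_of_le (le_trans (List.length_take_le i es) (by omega))]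
        rw [List.drop_eq_getElem_cons h]
        simp
      rw [hes']
      have hlen1 : ((es.take i ++ [v])).length = i + 1 := by
        simp [List.length_take_of_le (le_of_lt hi)]
      have hlt : i < ((es.take i ++ [v]) ++ es.drop (i + 2)).length := by
        simp; omega
      rw [ih _ hlt, List.take_left' hlen1, List.drop_left' hlen1]
      congr 1
      rw [htake2]
      unfold pvMerge
      rw [List.foldr_append, List.foldr_append]
      congr 1
      symm
      show List.foldr pvMStep [] [es[i], es[i+1]] = List.foldr pvMStep [] [v]
      simp only [List.foldr_cons, List.foldr_nil]
      show pvMStep es[i] (pvMStep es[i+1] []) = pvMStep v []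
      show pvMStep es[i] [es[i+1]] = pvMStep v []
      simp only [pvMStep]
      rw [if_pos hc]
    · rw [if_neg hc, ih es hi]
      have hdrop : es.drop (i + 1) = es[i + 1] :: es.drop (i + 2) := List.drop_eq_getElem_cons h
      rw [htake2, hdrop, List.take_succ_eq_append_getElem hi]
      unfold pvMerge
      rw [List.foldr_append, List.foldr_append]
      have h2 : ([es[i], es[i+1]] : List _).foldr pvMStep [] = [es[i]] ++ [es[i+1]] := by
        simp only [List.foldr_cons, List.foldr_nil]
        show pvMStep es[i] (pvMStep es[i+1] []) = _
        simp [pvMStep, hc]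
      rw [h2, pvFoldr_append_last _ _ _ (by simp)]
      have h1 : ([es[i]] : List _).foldr pvMStep [] = [es[i]] := by
        simp only [List.foldr_cons, List.foldr_nil]
        show pvMStep es[i] [] = _
        simp [pvMStep]
      rw [h1]
      simp

theorem pvA_eq_merge (data : List (String × String)) (classes : List String) :
    extract_entity_phrases data classes = (pvMerge (pvEntA data classes)).map pvProj := by
  unfold extract_entity_phrases
  cases h : (pvEntA data classes).length with
  | zero =>
    have : pvEntA data classes = [] := List.eq_nil_of_length_eq_zero h
    simp [this, pvLoopA, pvMerge]
  | succ n =>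
    have hlt : n < (pvEntA data classes).length := by omega
    rw [show n + 1 - 1 = n from rfl, pvLoopA_inv n (pvEntA data classes) hlt]
    rw [List.take_of_length_le (by omega), List.drop_eq_nil_of_le (by omega)]
    simp [pvProj]

-- ===== B-side: the forward pass computes pvMerge =====
-- B's loop body restricted to kept entities (the skipped items leave the state unchanged)
def pvStepB' (st : List (String × String) × Option (List String × String) × Int)
    (e : Int × String × String) :
    List (String × String) × Option (List String × String) × Int :=
  let (res, cur, prev) := st
  let (i, word, wclass) := e
  match cur with
  | some (run, rc) =>
    if i = prev + 1 ∧ wclass = rc then (res, some (run ++ [word], rc), i)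
    else (res ++ [(PySem.Str.join " " run, rc)], some ([word], wclass), i)
  | none => (res, some ([word], wclass), i)

-- " ".join over a snoc / a singleton
theorem pvChars_join_snoc : ∀ (l : List (List Char)) (x : List Char), l ≠ [] →
    PySem.Chars.join [' '] (l ++ [x]) = PySem.Chars.join [' '] l ++ [' '] ++ x := by
  intro l
  induction l with
  | nil => intro x h; simp at h
  | cons a t ih =>
    intro x h
    cases t with
    | nil => rw [List.cons_append, List.nil_append, PySem.Chars.join_cons_cons,
                 PySem.Chars.join_singleton, PySem.Chars.join_singleton]
    | cons b t' =>
      rw [List.cons_append, PySem.Chars.join_cons_cons, List.cons_append,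
          PySem.Chars.join_cons_cons, ← List.cons_append, ih x (by simp)]
      simp [List.append_assoc]

theorem pvJoin_snoc (run : List String) (x : String) (h : run ≠ []) :
    PySem.Str.join " " (run ++ [x]) = PySem.Str.join " " run ++ " " ++ x := by
  apply String.toList_inj.mp
  simp only [String.toList_append, PySem.Str.toList_join, List.map_append, List.map]
  exact pvChars_join_snoc _ _ (by simpa using h)

theorem pvJoin_one (x : String) : PySem.Str.join " " [x] = x := by
  apply String.toList_inj.mp
  simp [PySem.Str.toList_join, PySem.Chars.join_singleton]

theorem pvFoldB_skip (classes : List String) :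
    ∀ (l : List (Int × (String × String)))
      (st : List (String × String) × Option (List String × String) × Int),
      l.foldl (pvStepB classes) st =
        ((l.filter (fun p => classes.contains p.2.2)).map
          (fun p => (p.1, p.2.1, p.2.2))).foldl pvStepB' st := by
  intro l
  induction l with
  | nil => intro st; rfl
  | cons x l ih =>
    intro st
    obtain ⟨i, w, c⟩ := x
    by_cases hx : classes.contains c
    · have hm : c ∈ classes := List.mem_of_elem_eq_true hx
      have hf : ((i, (w, c)) :: l).filter (fun p => classes.contains p.2.2) =
          (i, (w, c)) :: l.filter (fun p => classes.contains p.2.2) := by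
        simp [hm]
      rw [List.foldl_cons, hf, List.map_cons, List.foldl_cons, ih]
      congr 1
      obtain ⟨res, cur, prev⟩ := st
      simp [pvStepB, pvStepB', hm]
    · have hx2 : classes.contains c = false := by simpa using hx
      have hm : c ∉ classes := by simp at hx2; exact hx2
      have hx2 : classes.contains c = false := by simpa using hx
      have hf : ((i, (w, c)) :: l).filter (fun p => classes.contains p.2.2) =
          l.filter (fun p => classes.contains p.2.2) := by
        simp [hm]
      rw [List.foldl_cons, hf, ih]
      congr 1
      obtain ⟨res, cur, prev⟩ := st
      simp [pvStepB, hm]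

theorem pvFoldB'_inv :
    ∀ (t : List (Int × String × String)) (res : List (String × String))
      (run : List String) (c : String) (j : Int), run ≠ [] →
      pvFlushB (t.foldl pvStepB' (res, some (run, c), j)) =
        res ++ (pvMerge ((j, PySem.Str.join " " run, c) :: t)).map pvProj := by
  intro t
  induction t with
  | nil => intro res run c j hrun; simp [pvFlushB, pvMerge, pvMStep, pvProj]
  | cons x t ih =>
    intro res run c j hrun
    obtain ⟨xi, xw, xc⟩ := x
    rw [List.foldl_cons]
    show pvFlushB (t.foldl pvStepB' (pvStepB' (res, some (run, c), j) (xi, xw, xc))) = _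
    by_cases hc : xi = j + 1 ∧ xc = c
    · have hstep : pvStepB' (res, some (run, c), j) (xi, xw, xc) =
          (res, some (run ++ [xw], c), xi) := by simp [pvStepB', hc]
      rw [hstep, ih _ _ _ _ (by simp), pvJoin_snoc run xw hrun]
      congr 1
      obtain ⟨hc1, hc2⟩ := hc
      subst hc2
      obtain ⟨s, r, h1, h2⟩ :=
        pvMStep_word xi xc xw (PySem.Str.join " " run ++ " " ++ xw) (pvMerge t)
      have hm1 : pvMerge ((xi, xw, xc) :: t) = (xi, xw ++ s, xc) :: r := h1
      have hm2 : pvMerge ((xi, PySem.Str.join " " run ++ " " ++ xw, xc) :: t) =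
          (xi, (PySem.Str.join " " run ++ " " ++ xw) ++ s, xc) :: r := h2
      show (pvMerge ((xi, PySem.Str.join " " run ++ " " ++ xw, xc) :: t)).map pvProj =
        (pvMStep (j, PySem.Str.join " " run, xc) (pvMerge ((xi, xw, xc) :: t))).map pvProj
      rw [hm1, hm2]
      simp only [pvMStep]
      rw [if_pos ⟨hc1, trivial⟩]
      simp [pvProj, String.append_assoc]
    · have hstep : pvStepB' (res, some (run, c), j) (xi, xw, xc) =
          (res ++ [(PySem.Str.join " " run, c)], some ([xw], xc), xi) := by
        simp [pvStepB', hc]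
      rw [hstep, ih _ _ _ _ (by simp), pvJoin_one]
      obtain ⟨w', r', hm⟩ := pvMerge_cons_head (xi, xw, xc) t
      show _ = res ++ (pvMStep (j, PySem.Str.join " " run, c)
        (pvMerge ((xi, xw, xc) :: t))).map pvProj
      rw [hm]
      simp only [pvMStep]
      rw [if_neg (by simpa using hc)]
      simp [pvProj]

theorem pvB_eq_merge (data : List (String × String)) (classes : List String) :
    extract_entity_phrases_alt data classes = (pvMerge (pvEntA data classes)).map pvProj := by
  unfold extract_entity_phrases_alt
  rw [pvFoldB_skip]
  have hcs : ∀ p : Int × (String × String),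
      List.contains (PySem.Set.ofList classes) p.2.2 = classes.contains p.2.2 := by
    intro p; simp [pysem]
  rw [List.filter_congr (fun x _ => hcs x)]
  show pvFlushB ((pvEntA data classes).foldl pvStepB' ([], none, -2)) = _
  cases hes : pvEntA data classes with
  | nil => simp [pvFlushB, pvMerge]
  | cons e t =>
    obtain ⟨i, w, c⟩ := e
    rw [List.foldl_cons]
    have hstep : pvStepB' ([], none, -2) (i, w, c) = ([], some ([w], c), i) := by
      simp [pvStepB']
    rw [hstep, pvFoldB'_inv _ _ _ _ _ (by simp), pvJoin_one]
    simp

-- ===== VERDICT (by name: the statement is the Claim_ definition above) =====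
theorem extract_entity_phrases_spec : Claim_equal_extract_entity_phrases := by
  intro data classes _
  unfold Spec_extract_entity_phrases
  rw [pvA_eq_merge, pvB_eq_merge]
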